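-- pv_equiv track=rewrite | github.com/InAnimaTe/zfs-recordsize-suggester | zfs-recordsize-suggester.py | compute_waste
-- ===== SOURCE A (Python) =====
-- def simulate_zfs_allocation(file_size, candidate_bytes):
--     if file_size == 0:
--         return 0
--     if file_size >= candidate_bytes:
--         blocks = (file_size + candidate_bytes - 1) // candidate_bytes
--         return blocks * candidate_bytes
--     else:
--         alloc = 512
--         while alloc < file_size and alloc < candidate_bytes:
--             alloc *= 2
--         return alloc
--
-- def compute_waste(candidate_bytes, file_sizes):
--     total_waste = 0
--     total_allocated = 0
--     for s in file_sizes: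
--         allocated = simulate_zfs_allocation(s, candidate_bytes)
--         total_waste += allocated - s
--         total_allocated += allocated
--     return total_waste, total_allocated
-- ===== SOURCE B (Python) =====
-- def compute_waste(candidate_bytes, file_sizes):
--     def alloc(s):
--         if s == 0:
--             return 0
--         if s >= candidate_bytes:
--             return ((s + candidate_bytes - 1) // candidate_bytes) * candidate_bytes
--         if s <= 512:
--             return 512
--         return 1 << (s - 1).bit_length()
--     total_allocated = sum(alloc(s) for s in file_sizes)
--     return total_allocated - sum(file_sizes), total_allocated
-- ===== Notes on version B (the rewrite author's own statement) =====
-- stated objective: simpler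
-- what changed: The per-file doubling while-loop is replaced by a closed form (512, or 1 << (s-1).bit_length(), the smallest power of two >= s, valid because s < candidate_bytes makes the loop's candidate guard vacuous), and the pair is accumulated as total_allocated = sum of allocations with waste = total_allocated - sum(file_sizes) instead of two running accumulators.
import Mathlib
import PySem

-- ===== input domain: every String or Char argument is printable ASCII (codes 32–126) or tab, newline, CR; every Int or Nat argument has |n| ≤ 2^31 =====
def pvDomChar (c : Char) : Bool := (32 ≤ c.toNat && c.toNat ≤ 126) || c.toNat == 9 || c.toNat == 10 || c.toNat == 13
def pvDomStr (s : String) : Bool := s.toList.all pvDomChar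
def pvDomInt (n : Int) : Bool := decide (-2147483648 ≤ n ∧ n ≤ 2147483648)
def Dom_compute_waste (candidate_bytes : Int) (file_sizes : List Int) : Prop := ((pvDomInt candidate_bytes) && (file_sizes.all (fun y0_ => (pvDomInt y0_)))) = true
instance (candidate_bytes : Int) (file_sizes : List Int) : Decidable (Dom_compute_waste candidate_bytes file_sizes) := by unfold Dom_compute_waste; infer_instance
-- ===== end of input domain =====

-- B replaces the doubling while-loop by a closed form (512 or 2^bit_length(s-1)) and
-- accumulates only total_allocated, recovering waste as total_allocated - sum(file_sizes).

-- ===== PORT A =====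
-- the 'while alloc < file_size and alloc < candidate_bytes: alloc *= 2' loop;
-- the '0 < alloc' conjunct only ensures termination in Lean and is always true at the
-- call site (alloc starts at 512 and only doubles), so the guard matches Python's.
def allocLoop (file_size candidate_bytes alloc : Int) : Int :=
  if h : 0 < alloc ∧ alloc < file_size ∧ alloc < candidate_bytes then
    allocLoop file_size candidate_bytes (alloc * 2)
  else alloc
termination_by (file_size - alloc).toNat
decreasing_by omega

def simulate_zfs_allocation (file_size candidate_bytes : Int) : Int :=
  if file_size = 0 then 0
  else if file_size ≥ candidate_bytes then
    PySem.Int.floordiv (file_size + candidate_bytes - 1) candidate_bytes * candidate_bytes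
  else allocLoop file_size candidate_bytes 512

def compute_waste (candidate_bytes : Int) (file_sizes : List Int) : Int × Int :=
  file_sizes.foldl
    (fun p s =>
      let allocated := simulate_zfs_allocation s candidate_bytes
      (p.1 + (allocated - s), p.2 + allocated))
    (0, 0)

-- ===== PORT B =====
-- '1 << (s - 1).bit_length()' is ported as 2 ^ bitLength (s - 1)
def allocB (candidate_bytes s : Int) : Int :=
  if s = 0 then 0
  else if s ≥ candidate_bytes then
    PySem.Int.floordiv (s + candidate_bytes - 1) candidate_bytes * candidate_bytes
  else if s ≤ 512 then 512
  else (2 : Int) ^ PySem.Int.bitLength (s - 1)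

def compute_waste_alt (candidate_bytes : Int) (file_sizes : List Int) : Int × Int :=
  let total_allocated := (file_sizes.map (allocB candidate_bytes)).sum
  (total_allocated - file_sizes.sum, total_allocated)

-- ===== PRECONDITION & SPEC =====
-- Pre_ excludes exactly the inputs where A raises ZeroDivisionError:
-- candidate_bytes = 0 together with some strictly positive file size.
def Pre_compute_waste (candidate_bytes : Int) (file_sizes : List Int) : Prop :=
  ¬ (candidate_bytes = 0 ∧ ∃ s ∈ file_sizes, 0 < s)
instance (candidate_bytes : Int) (file_sizes : List Int) : Decidable (Pre_compute_waste candidate_bytes file_sizes) := by unfold Pre_compute_waste; infer_instance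

def pvWitness_compute_waste : Int × List Int := (131072, [0, 513, 1024, 200000, -5])

def Spec_compute_waste (candidate_bytes : Int) (file_sizes : List Int) (out : Int × Int) : Prop := out = compute_waste_alt candidate_bytes file_sizes
instance (candidate_bytes : Int) (file_sizes : List Int) (out : Int × Int) : Decidable (Spec_compute_waste candidate_bytes file_sizes out) := by unfold Spec_compute_waste; infer_instance

-- ===== CLAIM (what is proved, stated in full; the proofs are below) =====
def Claim_equal_compute_waste : Prop := ∀ (candidate_bytes : Int) (file_sizes : List Int), Dom_compute_waste candidate_bytes file_sizes → Pre_compute_waste candidate_bytes file_sizes → Spec_compute_waste candidate_bytes file_sizes (compute_waste candidate_bytes file_sizes)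

-- ===== LEMMAS AND PROOFS =====

-- two powers of two bracketing the same s coincide
lemma pow_bracket_unique (s : Int) (j l : Nat)
    (hj : (2:Int) ^ (j - 1) < s) (hj' : s ≤ (2:Int) ^ j) (hj1 : 1 ≤ j)
    (hl : (2:Int) ^ (l - 1) < s) (hl' : s ≤ (2:Int) ^ l) (hl1 : 1 ≤ l) : j = l := by
  by_contra hne
  rcases Nat.lt_or_ge j l with h | h
  · have : (2:Int) ^ j ≤ 2 ^ (l - 1) := pow_le_pow_right₀ (by norm_num) (by omega)
    omega
  · have h' : l < j := by omega
    have : (2:Int) ^ l ≤ 2 ^ (j - 1) := pow_le_pow_right₀ (by norm_num) (by omega)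
    omega

-- the target closed form for s ≥ 513: 2^bitLength(s-1) brackets s
lemma target_brackets (s : Int) (hs : 513 ≤ s) :
    (2:Int) ^ (PySem.Int.bitLength (s-1) - 1) < s ∧ s ≤ (2:Int) ^ PySem.Int.bitLength (s-1)
      ∧ 1 ≤ PySem.Int.bitLength (s-1) := by
  have h0 : (s - 1).natAbs = (s - 1).toNat := by omega
  have h1 : (s - 1).natAbs < 2 ^ PySem.Int.bitLength (s - 1) := PySem.Int.lt_two_pow_bitLength _
  have h2 : 2 ^ (PySem.Int.bitLength (s - 1) - 1) ≤ (s - 1).natAbs :=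
    PySem.Int.two_pow_bitLength_le _ (by omega)
  have hL1 : 1 ≤ PySem.Int.bitLength (s - 1) := by
    by_contra h
    have : PySem.Int.bitLength (s - 1) = 0 := by omega
    simp [this] at h1; omega
  refine ⟨?_, ?_, hL1⟩
  · have hc : ((2:Int) ^ (PySem.Int.bitLength (s-1) - 1)) ≤ ((s - 1).natAbs : Int) := by
      exact_mod_cast h2
    omega
  · have hc : (((s - 1).natAbs : Int)) < (2:Int) ^ PySem.Int.bitLength (s-1) := by
      exact_mod_cast h1
    omega

-- loop invariant: starting from alloc = 2^j (j ≥ 9) with 2^(j-1) < s (or j = 9),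
-- the loop returns the closed form, provided s < candidate_bytes
lemma allocLoop_closed (s cb : Int) (hscb : s < cb) :
    ∀ (j : Nat), 9 ≤ j → (j = 9 ∨ (2:Int) ^ (j - 1) < s) →
      allocLoop s cb ((2:Int) ^ j) =
        (if s ≤ 512 then ((2:Int) ^ 9) else (2:Int) ^ PySem.Int.bitLength (s - 1)) := by
  intro j hj hinv
  have hpos : (0:Int) < 2 ^ j := by positivity
  by_cases hlt : (2:Int) ^ j < s
  · -- guard true (2^j < s < cb): one step
    rw [allocLoop]
    have hguard : 0 < (2:Int)^j ∧ (2:Int)^j < s ∧ (2:Int)^j < cb := ⟨hpos, hlt, by omega⟩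
    rw [dif_pos hguard]
    have h2 : (2:Int) ^ j * 2 = 2 ^ (j + 1) := by ring
    rw [h2]
    exact allocLoop_closed s cb hscb (j+1) (by omega) (Or.inr (by simpa using hlt))
  · -- guard false: loop returns 2^j; show it equals the closed form
    rw [allocLoop]
    have hguard : ¬ (0 < (2:Int)^j ∧ (2:Int)^j < s ∧ (2:Int)^j < cb) := by
      intro ⟨_, h, _⟩; exact hlt h
    rw [dif_neg hguard]
    by_cases hsmall : s ≤ 512
    · -- must be j = 9: invariant 2^(j-1) < s ≤ 512 = 2^9 forces j = 9
      rw [if_pos hsmall]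
      rcases hinv with h9 | hbig
      · rw [h9]
      · congr 1
        by_contra hne
        have hj10 : 10 ≤ j := by omega
        have : (2:Int) ^ 9 ≤ 2 ^ (j - 1) := pow_le_pow_right₀ (by norm_num) (by omega)
        have h512 : (2:Int) ^ 9 = 512 := by norm_num
        omega
    · rw [if_neg hsmall]
      have hs513 : 513 ≤ s := by omega
      obtain ⟨hb1, hb2, hb3⟩ := target_brackets s hs513
      have hinv' : (2:Int) ^ (j - 1) < s := by
        rcases hinv with h9 | h
        · subst h9; have : (2:Int)^(9-1) = 256 := by norm_num
          omega
        · exact h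
      congr 1
      exact pow_bracket_unique s j (PySem.Int.bitLength (s-1)) hinv' (by omega) (by omega) hb1 hb2 hb3
termination_by j => (s - (2:Int) ^ j).toNat
decreasing_by
  have _e : (2:Int) ^ (j + 1) = 2 * 2 ^ j := by ring
  omega

-- per-element: A's allocator equals B's closed form (unconditionally in Lean,
-- since floordiv is totalized; Python raises only outside Pre_)
lemma alloc_eq (cb s : Int) : simulate_zfs_allocation s cb = allocB cb s := by
  unfold simulate_zfs_allocation allocB
  by_cases h0 : s = 0
  · simp [h0]
  · rw [if_neg h0, if_neg h0]
    by_cases hge : s ≥ cb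
    · rw [if_pos hge, if_pos hge]
    · rw [if_neg hge, if_neg hge]
      have key := allocLoop_closed s cb (by omega) 9 (by omega) (Or.inl rfl)
      norm_num at key
      exact key

-- fold characterization
lemma fold_eq (cb : Int) (l : List Int) : ∀ tw ta : Int,
    l.foldl (fun p s =>
        let allocated := simulate_zfs_allocation s cb
        (p.1 + (allocated - s), p.2 + allocated)) (tw, ta) =
      (tw + (l.map (allocB cb)).sum - l.sum, ta + (l.map (allocB cb)).sum) := by
  induction l with
  | nil => intro tw ta; simp
  | cons x xs ih =>
    intro tw ta
    simp only [List.foldl_cons, List.map_cons, List.sum_cons]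
    rw [ih]
    rw [alloc_eq cb x]
    rw [Prod.mk.injEq]
    constructor <;> ring

-- ===== VERDICT (by name: the statement is the Claim_ definition above) =====
theorem compute_waste_spec : Claim_equal_compute_waste := by
  intro cb l _ _
  show compute_waste cb l = compute_waste_alt cb l
  unfold compute_waste compute_waste_alt
  rw [fold_eq cb l 0 0]
  simp
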